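-- pv_equiv track=rewrite | github.com/sandeepgupta2k4/aoc-2021 | 18B.py | get_child
-- ===== SOURCE A (Python) =====
-- def get_child(i, num):
--     ch = num[i]
--     s = ""
--     start = i
--     while ch != "]":
--         if ch == "[":
--             s = ch
--             start = i
--             i += 1
--             ch = num[i]
--         else:
--             s += ch
--             i += 1
--             ch = num[i]
--     return start, i, s
-- ===== SOURCE B (Python) =====
-- def get_child(i, num):
--     # find the closing ']' with a raw index scan (same IndexError as A when absent)
--     j = i
--     while num[j] != "]":
--         j += 1
--     # find the last '[' strictly before j, scanning backward; default to i
--     start = i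
--     for k in range(j - 1, i - 1, -1):
--         if num[k] == "[":
--             start = k
--             break
--     return start, j, "".join(num[k] for k in range(start, j))
-- ===== Notes on version B (the rewrite author's own statement) =====
-- stated objective: alternative
-- what changed: A builds the substring in one forward pass, resetting an accumulator at every '['; B decomposes the task into three phases: a forward scan for the closing ']', a backward scan for the last '[', and a join over the index range, never accumulating during the search.
import Mathlib
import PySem

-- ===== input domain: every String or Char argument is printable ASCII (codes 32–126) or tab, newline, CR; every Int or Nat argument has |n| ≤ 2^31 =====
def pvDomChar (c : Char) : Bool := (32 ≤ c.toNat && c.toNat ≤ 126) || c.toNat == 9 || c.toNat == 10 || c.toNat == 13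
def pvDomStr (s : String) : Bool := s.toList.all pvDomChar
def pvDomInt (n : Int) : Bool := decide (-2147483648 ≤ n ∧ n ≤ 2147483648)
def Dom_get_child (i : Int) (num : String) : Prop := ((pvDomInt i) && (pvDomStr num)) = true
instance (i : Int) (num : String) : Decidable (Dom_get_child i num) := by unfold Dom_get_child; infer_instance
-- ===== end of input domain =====

-- B replaces A's single accumulating pass by a find-end / backward-find-'[' / join decomposition (alternative, same cost).

-- ===== PORT A =====
-- A's while loop: accumulate chars into s, resetting s and start at every '['; stop at ']'.
-- The string accumulator is carried as a List Char (PySem.Chars convention); fuel 2*len+1 bounds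
-- the number of index accesses (indices move from at worst -len up to len).
def getChildLoopA (num : String) (fuel : Nat) (i start : Int) (s : List Char) : Int × Int × List Char :=
  match fuel with
  | 0 => (start, i, s)
  | Nat.succ fuel =>
    match PySem.Str.pyGet? num i with
    | none => (start, i, s)          -- IndexError in Python; outside Pre_
    | some ch =>
      if ch = ']' then (start, i, s)
      else if ch = '[' then getChildLoopA num fuel (i+1) i ['[']
      else getChildLoopA num fuel (i+1) start (s ++ [ch])

def get_child (i : Int) (num : String) : Int × Int × String :=
  let r := getChildLoopA num (2 * num.length + 1) i i []
  (r.1, r.2.1, String.ofList r.2.2)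

-- ===== PORT B =====
-- forward scan 'while num[j] != "]": j += 1'
def findEndB (num : String) (fuel : Nat) (j : Int) : Int :=
  match fuel with
  | 0 => j
  | Nat.succ fuel =>
    match PySem.Str.pyGet? num j with
    | none => j                      -- IndexError in Python; outside Pre_
    | some ch => if ch = ']' then j else findEndB num fuel (j+1)

def get_child_alt (i : Int) (num : String) : Int × Int × String :=
  let j := findEndB num (2 * num.length + 1) i
  -- 'for k in range(j-1, i-1, -1): if num[k] == "[": start = k; break' (default start = i)
  let start := ((PySem.List.pyRange (j-1) (i-1) (-1)).find?
                  (fun k => PySem.Str.pyGet? num k == some '[')).getD i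
  -- '"".join(num[k] for k in range(start, j))'
  (start, j, String.ofList ((PySem.List.pyRange start j 1).filterMap (fun k => PySem.Str.pyGet? num k)))

-- ===== PRECONDITION & SPEC =====
-- Pre_: exactly the inputs where Python A returns (no IndexError): the first access num[i] is
-- in range on the low side, and some ']' occurs at an integer index k with i ≤ k < len(num).
def Pre_get_child (i : Int) (num : String) : Prop :=
  -(num.length : Int) ≤ i ∧
  ∃ k ∈ PySem.List.pyRange i (num.length : Int) 1, PySem.Str.pyGet? num k = some ']'
instance (i : Int) (num : String) : Decidable (Pre_get_child i num) := by
  unfold Pre_get_child; infer_instance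
def pvWitness_get_child : Int × String := (0, "[ab]")

def Spec_get_child (i : Int) (num : String) (out : Int × Int × String) : Prop := out = get_child_alt i num
instance (i : Int) (num : String) (out : Int × Int × String) : Decidable (Spec_get_child i num out) := by unfold Spec_get_child; infer_instance

-- ===== CLAIM (what is proved, stated in full; the proofs are below) =====
def Claim_equal_get_child : Prop := ∀ (i : Int) (num : String), Dom_get_child i num → Pre_get_child i num → Spec_get_child i num (get_child i num)

-- ===== LEMMAS AND PROOFS =====

theorem findEndB_ge (num : String) (fuel : Nat) : ∀ j : Int, j ≤ findEndB num fuel j := by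
  induction fuel with
  | zero => intro j; simp [findEndB]
  | succ f ih =>
    intro j
    unfold findEndB
    cases h : PySem.Str.pyGet? num j with
    | none => simp
    | some ch =>
      by_cases hc : ch = ']'
      · simp [hc]
      · simpa [hc] using le_trans (by omega) (ih (j+1))

-- chars of nm from int index a (inclusive) to b (exclusive), Python-indexed
def charsOf (nm : List Char) (a b : Int) : List Char :=
  (PySem.List.pyRange a b 1).filterMap (fun k => PySem.List.pyGet? nm k)

theorem charsOf_cons (nm : List Char) (a b : Int) (h : a < b) (c : Char)
    (hc : PySem.List.pyGet? nm a = some c) :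
    charsOf nm a b = c :: charsOf nm (a+1) b := by
  unfold charsOf
  rw [PySem.List.pyRange_one_cons h]
  simp [hc]

theorem range_down_split (i j : Int) (h : i < j) :
    PySem.List.pyRange (j-1) (i-1) (-1) = PySem.List.pyRange (j-1) i (-1) ++ [i] := by
  rw [PySem.List.pyRange_neg_one_eq_reverse, PySem.List.pyRange_neg_one_eq_reverse]
  have h1 : i - 1 + 1 = i := by ring
  have h2 : j - 1 + 1 = j := by ring
  rw [h1, h2]
  rw [PySem.List.pyRange_one_cons h]
  simp

-- Main invariant: A's loop equals B's three-phase decomposition, for any fuel, start, accumulator.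

theorem findEndB_none (num : String) (f : Nat) (i : Int)
    (h : PySem.List.pyGet? num.toList i = none) : findEndB num (f+1) i = i := by
  simp [findEndB, h]

theorem findEndB_close (num : String) (f : Nat) (i : Int)
    (h : PySem.List.pyGet? num.toList i = some ']') : findEndB num (f+1) i = i := by
  simp [findEndB, h]

theorem findEndB_step (num : String) (f : Nat) (i : Int) (ch : Char)
    (h : PySem.List.pyGet? num.toList i = some ch) (hc : ch ≠ ']') :
    findEndB num (f+1) i = findEndB num f (i+1) := by
  simp [findEndB, h, hc]

theorem loop_eq (num : String) (fuel : Nat) : ∀ (i start : Int) (s : List Char),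
    getChildLoopA num fuel i start s =
      (match (PySem.List.pyRange ((findEndB num fuel i) - 1) (i-1) (-1)).find?
               (fun k => PySem.List.pyGet? num.toList k == some '[') with
       | some L => (L, findEndB num fuel i, charsOf num.toList L (findEndB num fuel i))
       | none => (start, findEndB num fuel i, s ++ charsOf num.toList i (findEndB num fuel i))) := by
  induction fuel with
  | zero =>
    intro i start s
    simp [getChildLoopA, findEndB, PySem.List.pyRange_neg_one_eq_nil (by omega : i - 1 ≤ i - 1),
      charsOf, PySem.List.pyRange_one_eq_nil (by omega : i ≤ i)]
  | succ f ih =>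
    intro i start s
    unfold getChildLoopA
    cases h : PySem.Str.pyGet? num i with
    | none =>
      rw [findEndB_none num f i (by simpa using h)]
      simp [PySem.List.pyRange_neg_one_eq_nil (by omega : i - 1 ≤ i - 1),
        charsOf, PySem.List.pyRange_one_eq_nil (by omega : i ≤ i)]
    | some ch =>
      have h' : PySem.List.pyGet? num.toList i = some ch := by simpa using h
      by_cases hrb : ch = ']'
      · subst hrb
        rw [findEndB_close num f i (by simpa using h)]
        simp [PySem.List.pyRange_neg_one_eq_nil (by omega : i - 1 ≤ i - 1),
          charsOf, PySem.List.pyRange_one_eq_nil (by omega : i ≤ i)]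
      · have hj : i + 1 ≤ findEndB num f (i+1) := findEndB_ge num f (i+1)
        rw [findEndB_step num f i ch h' hrb]
        by_cases hlb : ch = '['
        · -- '[' : reset accumulator and start
          subst hlb
          dsimp only
          rw [if_neg (by decide : ¬('[' = ']'))]
          rw [if_pos (rfl : '[' = '[')]
          rw [ih (i+1) i ['[']]
          have hs : i + 1 - 1 = i := by ring
          rw [hs]
          rw [range_down_split i (findEndB num f (i+1)) (by omega)]
          rw [List.find?_append]
          cases hf : (PySem.List.pyRange ((findEndB num f (i+1)) - 1) i (-1)).find?
              (fun k => PySem.List.pyGet? num.toList k == some '[') with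
          | some L => simp
          | none =>
            have hfi : (List.find? (fun k => PySem.List.pyGet? num.toList k == some '[') [i]) = some i := by
              simp [h']
            rw [hfi, Option.none_or]
            dsimp only
            rw [charsOf_cons num.toList i (findEndB num f (i+1)) (by omega) '[' h']
            simp
        · -- ordinary char: append to accumulator
          dsimp only
          rw [if_neg hrb, if_neg hlb]
          rw [ih (i+1) start (s ++ [ch])]
          have hs : i + 1 - 1 = i := by ring
          rw [hs]
          rw [range_down_split i (findEndB num f (i+1)) (by omega)]
          rw [List.find?_append]
          have hpi : (PySem.List.pyGet? num.toList i == some '[') = false := by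
            simp [h', hlb]
          cases hf : (PySem.List.pyRange ((findEndB num f (i+1)) - 1) i (-1)).find?
              (fun k => PySem.List.pyGet? num.toList k == some '[') with
          | some L => simp
          | none =>
            have hfi : (List.find? (fun k => PySem.List.pyGet? num.toList k == some '[') [i]) = none := by
              simp [hpi]
            rw [hfi, Option.none_or]
            dsimp only
            rw [charsOf_cons num.toList i (findEndB num f (i+1)) (by omega) ch h']
            simp

-- ===== VERDICT (by name: the statement is the Claim_ definition above) =====
theorem get_child_spec : Claim_equal_get_child := by
  intro i num _hdom _hpre
  unfold Spec_get_child get_child get_child_alt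
  rw [loop_eq num (2 * num.length + 1) i i []]
  cases hf : (PySem.List.pyRange ((findEndB num (2 * num.length + 1) i) - 1) (i-1) (-1)).find?
      (fun k => PySem.List.pyGet? num.toList k == some '[') with
  | some L => simp [hf, charsOf]
  | none => simp [hf, charsOf]
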